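-- pv_equiv track=rewrite | github.com/minimo162/yakulingo | yakulingo/services/local_ai_prompt_builder.py | _split_top_level_rule_blocks
-- ===== SOURCE A (Python) =====
-- from typing import Any, Optional, Sequence, cast
--
-- def _split_top_level_rule_blocks(section: str) -> list[tuple[str, list[str]]]:
--     blocks: list[tuple[str, list[str]]] = []
--     head: Optional[str] = None
--     body: list[str] = []
--     for raw in (section or "").splitlines():
--         line = raw.rstrip()
--         stripped = line.lstrip()
--         indent = len(line) - len(stripped)
--         if stripped.startswith("- ") and indent == 0:
--             if head is not None:
--                 blocks.append((head, body))
--             head = line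
--             body = []
--             continue
--         if head is None:
--             if line:
--                 blocks.append((line, []))
--             continue
--         body.append(line)
--     if head is not None:
--         blocks.append((head, body))
--     return blocks
-- ===== SOURCE B (Python) =====
-- def _is_top_header(line: str) -> bool:
--     stripped = line.lstrip()
--     return stripped.startswith("- ") and len(stripped) == len(line)
--
--
-- def _span_non_headers(lines: list[str]) -> tuple[list[str], list[str]]:
--     """Longest prefix of lines with no top-level header, and the remainder."""
--     k = 0
--     while k < len(lines) and not _is_top_header(lines[k]):
--         k += 1
--     return lines[:k], lines[k:]
--
--
-- def _split_top_level_rule_blocks(section: str) -> list[tuple[str, list[str]]]: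
--     lines = [raw.rstrip() for raw in (section or "").splitlines()]
--     preamble, rest = _span_non_headers(lines)
--     blocks: list[tuple[str, list[str]]] = [(line, []) for line in preamble if line]
--     while rest:
--         head, tail = rest[0], rest[1:]
--         body, rest = _span_non_headers(tail)
--         blocks.append((head, body))
--     return blocks
-- ===== Notes on version B (the rewrite author's own statement) =====
-- stated objective: alternative
-- what changed: Replaces A's single state-machine fold (Optional head, running body, final flush) with a two-phase span decomposition: rstrip all lines once, split off the longest non-header prefix as standalone blocks, then repeatedly take head and span off its body up to the next header.
import Mathlib
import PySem

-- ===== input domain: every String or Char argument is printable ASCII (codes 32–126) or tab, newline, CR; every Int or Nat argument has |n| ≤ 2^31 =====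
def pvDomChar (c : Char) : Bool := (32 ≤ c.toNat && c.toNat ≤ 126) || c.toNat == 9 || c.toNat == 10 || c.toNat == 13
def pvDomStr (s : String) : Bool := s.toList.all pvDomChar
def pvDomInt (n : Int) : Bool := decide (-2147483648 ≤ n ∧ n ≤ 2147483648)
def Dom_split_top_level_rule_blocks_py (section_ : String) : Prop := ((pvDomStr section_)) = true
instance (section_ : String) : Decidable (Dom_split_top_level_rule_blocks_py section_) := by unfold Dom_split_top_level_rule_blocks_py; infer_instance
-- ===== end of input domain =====

-- B replaces A's one-pass state machine (Optional head, running body, final flush) with a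
-- two-phase span/takeWhile decomposition over the pre-rstripped lines; same cost ("alternative").

-- ===== PORT A =====
-- the loop body of A, with `line = raw.rstrip()` already applied (A's step is pvAStep below)
def pvAStepLine (st : (List (String × List String)) × Option String × List String)
    (line : String) : (List (String × List String)) × Option String × List String :=
  let stripped := PySem.Str.lstrip line
  let indent : Int := (PySem.Str.len line : Int) - (PySem.Str.len stripped : Int)
  if PySem.Str.startswith stripped "- " && (indent == 0) then
    match st with
    | (blocks, some h, body) => (blocks ++ [(h, body)], some line, [])
    | (blocks, none, _) => (blocks, some line, [])
  else
    match st with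
    | (blocks, none, body) =>
        (if line ≠ "" then blocks ++ [(line, [])] else blocks, none, body)
    | (blocks, some h, body) => (blocks, some h, body ++ [line])

def pvAStep (st : (List (String × List String)) × Option String × List String)
    (raw : String) : (List (String × List String)) × Option String × List String :=
  pvAStepLine st (PySem.Str.rstrip raw)

def split_top_level_rule_blocks_py (section_ : String) : List (String × List String) :=
  match (PySem.Str.splitlines section_).foldl pvAStep ([], none, []) with
  | (blocks, some h, body) => blocks ++ [(h, body)]
  | (blocks, none, _) => blocks

-- ===== PORT B =====
def pvIsTopHeader (line : String) : Bool :=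
  let stripped := PySem.Str.lstrip line
  PySem.Str.startswith stripped "- " && (PySem.Str.len stripped == PySem.Str.len line)

def pvSpanNonHeaders (lines : List String) : List String × List String :=
  (lines.takeWhile (fun l => !pvIsTopHeader l), lines.dropWhile (fun l => !pvIsTopHeader l))


def pvBlocksLoop (rest : List String) : List (String × List String) :=
  match rest with
  | [] => []
  | head :: tail =>
    let pr := pvSpanNonHeaders tail
    (head, pr.1) :: pvBlocksLoop pr.2
termination_by rest.length
decreasing_by
  simp only [pvSpanNonHeaders]
  exact Nat.lt_succ_of_le (tail.length_dropWhile_le _)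
def split_top_level_rule_blocks_py_alt (section_ : String) : List (String × List String) :=
  let lines := (PySem.Str.splitlines section_).map PySem.Str.rstrip
  let pr := pvSpanNonHeaders lines
  ((pr.1.filter (fun l => l ≠ "")).map (fun l => (l, ([] : List String)))) ++ pvBlocksLoop pr.2

-- ===== PRECONDITION & SPEC =====
def Spec_split_top_level_rule_blocks_py (section_ : String) (out : List (String × List String)) : Prop := out = split_top_level_rule_blocks_py_alt section_
instance (section_ : String) (out : List (String × List String)) : Decidable (Spec_split_top_level_rule_blocks_py section_ out) := by unfold Spec_split_top_level_rule_blocks_py; infer_instance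

-- ===== CLAIM (what is proved, stated in full; the proofs are below) =====
def Claim_equal_split_top_level_rule_blocks_py : Prop := ∀ (section_ : String), Dom_split_top_level_rule_blocks_py section_ → Spec_split_top_level_rule_blocks_py section_ (split_top_level_rule_blocks_py section_)

-- ===== LEMMAS AND PROOFS =====

lemma pvBlocksLoop_nil : pvBlocksLoop [] = [] := by
  rw [pvBlocksLoop.eq_def]

lemma pvBlocksLoop_cons (h : String) (t : List String) :
    pvBlocksLoop (h :: t) = (h, t.takeWhile (fun l => !pvIsTopHeader l))
      :: pvBlocksLoop (t.dropWhile (fun l => !pvIsTopHeader l)) := by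
  rw [pvBlocksLoop.eq_def]
  rfl

-- A's header test (indent == 0) agrees with B's (equal lengths)
lemma pvHeader_eq (line : String) :
    (PySem.Str.startswith (PySem.Str.lstrip line) "- "
      && (((PySem.Str.len line : Int) - (PySem.Str.len (PySem.Str.lstrip line) : Int)) == 0))
    = pvIsTopHeader line := by
  simp only [pvIsTopHeader]
  congr 1
  rw [Bool.eq_iff_iff]
  simp only [beq_iff_eq]
  omega

lemma pvStep_some (blocks : List (String × List String)) (h : String) (b : List String)
    (l : String) :
    pvAStepLine (blocks, some h, b) l =
      if pvIsTopHeader l then (blocks ++ [(h, b)], some l, []) else (blocks, some h, b ++ [l]) := by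
  simp only [pvAStepLine, pvHeader_eq]

lemma pvStep_none (blocks : List (String × List String)) (b : List String) (l : String) :
    pvAStepLine (blocks, none, b) l =
      if pvIsTopHeader l then (blocks, some l, [])
      else (if l ≠ "" then blocks ++ [(l, [])] else blocks, none, b) := by
  simp only [pvAStepLine, pvHeader_eq]

def pvFin (st : (List (String × List String)) × Option String × List String) :
    List (String × List String) :=
  match st with
  | (blocks, some h, body) => blocks ++ [(h, body)]
  | (blocks, none, _) => blocks

-- invariant while a head is open: the body collects lines up to the next header
lemma pvFold_some (ls : List String) : ∀ (blocks : List (String × List String))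
    (h : String) (b : List String),
    pvFin (ls.foldl pvAStepLine (blocks, some h, b))
      = blocks ++ [(h, b ++ ls.takeWhile (fun l => !pvIsTopHeader l))]
          ++ pvBlocksLoop (ls.dropWhile (fun l => !pvIsTopHeader l)) := by
  induction ls with
  | nil => intro blocks h b; simp [pvFin, pvBlocksLoop_nil]
  | cons l t ih =>
    intro blocks h b
    simp only [List.foldl_cons, pvStep_some]
    by_cases hl : pvIsTopHeader l = true
    · rw [if_pos hl, ih, List.takeWhile_cons_of_neg (by simp [hl]),
        List.dropWhile_cons_of_neg (by simp [hl]), pvBlocksLoop_cons]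
      simp
    · rw [if_neg hl, ih, List.takeWhile_cons_of_pos (by simp [hl]),
        List.dropWhile_cons_of_pos (by simp [hl])]
      simp

-- before the first header: nonempty lines become standalone blocks
lemma pvFold_none (ls : List String) : ∀ (blocks : List (String × List String))
    (b : List String),
    pvFin (ls.foldl pvAStepLine (blocks, none, b))
      = blocks ++ ((ls.takeWhile (fun l => !pvIsTopHeader l)).filter (fun l => l ≠ "")).map
            (fun l => (l, ([] : List String)))
          ++ pvBlocksLoop (ls.dropWhile (fun l => !pvIsTopHeader l)) := by
  induction ls with
  | nil => intro blocks b; simp [pvFin, pvBlocksLoop_nil]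
  | cons l t ih =>
    intro blocks b
    simp only [List.foldl_cons, pvStep_none]
    by_cases hl : pvIsTopHeader l = true
    · rw [if_pos hl, pvFold_some, List.takeWhile_cons_of_neg (by simp [hl]),
        List.dropWhile_cons_of_neg (by simp [hl]), pvBlocksLoop_cons]
      simp
    · rw [if_neg hl, ih, List.takeWhile_cons_of_pos (by simp [hl]),
        List.dropWhile_cons_of_pos (by simp [hl])]
      by_cases he : l = ""
      · simp [he]
      · simp [he]

-- A's fold with rstrip inside equals the plain fold over the pre-rstripped lines
lemma pvFoldA (ls : List String)
    (st : (List (String × List String)) × Option String × List String) :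
    ls.foldl pvAStep st = (ls.map PySem.Str.rstrip).foldl pvAStepLine st := by
  induction ls generalizing st with
  | nil => rw [List.map_nil, List.foldl_nil, List.foldl_nil]
  | cons r t ih =>
    rw [List.map_cons, List.foldl_cons, List.foldl_cons, ih, pvAStep]

-- ===== VERDICT (by name: the statement is the Claim_ definition above) =====
theorem split_top_level_rule_blocks_py_spec : Claim_equal_split_top_level_rule_blocks_py := by
  intro section_ _
  show split_top_level_rule_blocks_py section_ = split_top_level_rule_blocks_py_alt section_
  have hA : split_top_level_rule_blocks_py section_
      = pvFin (((PySem.Str.splitlines section_).map PySem.Str.rstrip).foldl pvAStepLine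
          ([], none, [])) := by
    unfold split_top_level_rule_blocks_py
    rw [pvFoldA]
    rfl
  rw [hA, pvFold_none]
  unfold split_top_level_rule_blocks_py_alt pvSpanNonHeaders
  simp
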